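-- pv_equiv track=rewrite | github.com/Coki628/kyopro_submissions | AtCoder/AGC009b.py | dfs
-- ===== SOURCE A (Python) =====
-- from collections import Counter
--
-- def dfs(N, nodes, src):
--     """ DFS(木、再帰、重みなし) """
--
--     def rec(u, prev):
--         C = Counter()
--         for v in nodes[u]:
--             if v != prev:
--                 C[rec(v, u) + 1] += 1
--         if not C:
--             return 0
--         # それまでの試合数が多くかかる方から見ていく
--         C = sorted(C.items(), reverse=1)
--         # 元の最大試合数
--         mx = C[0][0]
--         # 重複による追加分
--         add = C[0][1] - 1
--         # 重複をカバーする空き時間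
--         vacant = 0
--         for i, (k, v) in enumerate(C[1:], 1):
--             k2, _ = C[i-1]
--             # 試合がなくて他に当てられる時間を足す
--             vacant += k2 - k - 1
--             # 今回の重複分を引く
--             vacant -= v - 1
--             # 空き時間が足りなければ、最大以降に追加する
--             if vacant < 0:
--                 add += abs(vacant)
--                 vacant = 0
--         return mx + add
--
--     return rec(src, -1)
-- ===== SOURCE B (Python) =====
-- def dfs(N, nodes, src):
--     """ DFS(木、再帰、重みなし) """
--
--     def rec(u, prev):
--         vals = sorted(rec(v, u) + 1 for v in nodes[u] if v != prev)
--         if not vals: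
--             return 0
--         # Schedule the costliest subtree last in this ascending order: with the
--         # child costs ascending, the running bound is best = max(best + 1, x).
--         best = vals[0]
--         for x in vals[1:]:
--             best = max(best + 1, x)
--         return best
--
--     return rec(src, -1)
-- ===== Notes on version B (the rewrite author's own statement) =====
-- stated objective: simpler
-- what changed: Per node, A groups child costs in a Counter, sorts the (cost,multiplicity) items descending and runs a vacant/add bookkeeping loop; B sorts the raw child-cost list ascending and folds best = max(best+1, x), with the child list built by a plain comprehension instead of Counter accumulation.
import Mathlib
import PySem

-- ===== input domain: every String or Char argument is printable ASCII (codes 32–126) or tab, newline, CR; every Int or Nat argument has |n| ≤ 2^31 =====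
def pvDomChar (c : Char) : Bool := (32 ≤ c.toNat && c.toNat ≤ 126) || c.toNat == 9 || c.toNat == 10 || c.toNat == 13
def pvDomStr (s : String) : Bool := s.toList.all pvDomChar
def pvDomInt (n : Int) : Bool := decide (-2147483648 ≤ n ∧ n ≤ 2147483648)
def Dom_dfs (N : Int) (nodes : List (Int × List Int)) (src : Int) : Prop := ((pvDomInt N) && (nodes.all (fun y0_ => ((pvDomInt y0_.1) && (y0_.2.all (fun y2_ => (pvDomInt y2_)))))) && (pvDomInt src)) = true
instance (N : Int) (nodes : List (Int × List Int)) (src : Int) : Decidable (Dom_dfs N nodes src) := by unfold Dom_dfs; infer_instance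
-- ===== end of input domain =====

-- B drops A's Counter and vacant/add bookkeeping: it sorts the raw child costs
-- ascending and folds best = max(best + 1, x) (objective: simpler).

-- ===== PORT A =====
-- A's recursion, with fuel making it total (fuel only pads what Python's call stack does;
-- Pre_dfs guarantees it never runs out). `none` = the Python raises (KeyError / unbounded recursion).
def dfsRecA (nodes : List (Int × List Int)) (fuel : Nat) (u prev : Int) : Option Int :=
  match fuel with
  | 0 => none
  | Nat.succ fuel =>
    match (PySem.Dict.ofList nodes).get? u with
    | none => none                  -- nodes[u] : KeyError
    | some adj =>
      -- for v in nodes[u]: if v != prev: C[rec(v, u) + 1] += 1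
      let oC : Option (PySem.Dict Int Int) :=
        adj.foldl (fun oC v =>
          match oC with
          | none => none
          | some C =>
            if v ≠ prev then
              match dfsRecA nodes fuel v u with
              | none => none
              | some r => some (C.modify (r + 1) 0 (· + 1))
            else some C) (some PySem.Dict.empty)
      match oC with
      | none => none
      | some C =>
        -- sorted(C.items(), reverse=1); the [] arm is Python's `if not C: return 0`
        match PySem.List.sorted2 C.items (fun p => p.1) (fun p => p.2) true with
        | [] => some 0
        | c0 :: rest =>
          -- mx = C[0][0]; add = C[0][1] - 1; vacant = 0; the fold state is (k2, vacant, add),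
          -- where k2 carries C[i-1][0] (the previous item's key) between iterations
          let st := rest.foldl (fun (st : Int × Int × Int) kv =>
            let vacant := st.2.1 + (st.1 - kv.1 - 1) - (kv.2 - 1)
            if vacant < 0 then (kv.1, 0, st.2.2 + |vacant|) else (kv.1, vacant, st.2.2))
            (c0.1, 0, c0.2 - 1)
          some (c0.1 + st.2.2)

def dfs (N : Int) (nodes : List (Int × List Int)) (src : Int) : Int :=
  (dfsRecA nodes ((nodes.map (fun p => p.2.length)).sum + 2) src (-1)).getD 0

-- ===== PORT B =====
-- B's recursion; `vals = sorted(rec(v, u) + 1 for v in nodes[u] if v != prev)` is the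
-- mapM over the filtered adjacency list, `vals[0]` / `vals[1:]` the match on the sorted list.
def dfsRecB (nodes : List (Int × List Int)) : Nat → Int → Int → Option Int
  | 0, _, _ => none
  | Nat.succ fuel, u, prev =>
    ((PySem.Dict.ofList nodes).get? u).bind fun adj =>
      ((adj.filter (fun v => v != prev)).mapM (fun v => (dfsRecB nodes fuel v u).map (· + 1))).map
        fun vals =>
          match PySem.List.sorted vals (fun x => x) false with
          | [] => 0
          | x0 :: t => t.foldl (fun best x => max (best + 1) x) x0

def dfs_alt (N : Int) (nodes : List (Int × List Int)) (src : Int) : Int :=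
  (dfsRecB nodes ((nodes.map (fun p => p.2.length)).sum + 2) src (-1)).getD 0

-- ===== PRECONDITION & SPEC =====
-- helpers for Pre_ only (the ports do their own dict lookups)
def pvNbrs (nodes : List (Int × List Int)) (u : Int) : List Int :=
  ((PySem.Dict.ofList nodes).get? u).getD []
-- successor states of the walk: from (u, prev) it visits (v, u) for each neighbour v ≠ prev
def pvSucc (nodes : List (Int × List Int)) (s : Int × Int) : List (Int × Int) :=
  ((pvNbrs nodes s.1).filter (fun v => v ≠ s.2)).map (fun v => (v, s.1))
-- closure of a state set under pvSucc (enough iterations to reach the fixpoint)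
def pvClose (nodes : List (Int × List Int)) (S : List (Int × Int)) : List (Int × Int) :=
  (fun T => PySem.List.dedup (T ++ T.flatMap (pvSucc nodes)))^[(nodes.map (fun p => p.2.length)).sum + 1] S

-- Pre_ is exactly A's domain of normal return: every (node, predecessor) state the
-- prev-avoiding walk from src reaches has its node among the dict keys, and no state can
-- reach itself again, so the exploration is finite; outside it A raises KeyError or
-- exhausts the recursion limit.
def Pre_dfs (N : Int) (nodes : List (Int × List Int)) (src : Int) : Prop :=
  ∀ s ∈ pvClose nodes [(src, -1)],
    s.1 ∈ nodes.map Prod.fst ∧ s ∉ pvClose nodes (pvSucc nodes s)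
instance (N : Int) (nodes : List (Int × List Int)) (src : Int) : Decidable (Pre_dfs N nodes src) := by
  unfold Pre_dfs; infer_instance

def pvWitness_dfs : Int × (List (Int × List Int)) × Int :=
  (3, [(0, [1, 2]), (1, [0]), (2, [0])], 0)

def Spec_dfs (N : Int) (nodes : List (Int × List Int)) (src : Int) (out : Int) : Prop := out = dfs_alt N nodes src
instance (N : Int) (nodes : List (Int × List Int)) (src : Int) (out : Int) : Decidable (Spec_dfs N nodes src out) := by unfold Spec_dfs; infer_instance

-- ===== CLAIM (what is proved, stated in full; the proofs are below) =====
def Claim_equal_dfs : Prop := ∀ (N : Int) (nodes : List (Int × List Int)) (src : Int), Dom_dfs N nodes src → Pre_dfs N nodes src → Spec_dfs N nodes src (dfs N nodes src)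

-- ===== LEMMAS AND PROOFS =====

-- `insertBy` only looks at `before x y` for list members y
theorem insertBy_congr {α : Type} (f g : α → α → Bool) (x : α) (ys : List α)
    (h : ∀ y ∈ ys, f x y = g x y) :
    PySem.List.insertBy f x ys = PySem.List.insertBy g x ys := by
  induction ys with
  | nil => rfl
  | cons y ys ih =>
    simp only [PySem.List.insertBy]
    rw [h y (List.mem_cons_self)]
    split
    · rfl
    · rw [ih (fun z hz => h z (List.mem_cons_of_mem _ hz))]

theorem foldl_insertBy_congr {α : Type} (f g : α → α → Bool) (xs : List α) :
    ∀ (acc : List α),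
    (∀ a ∈ xs, ∀ b, (b ∈ acc ∨ b ∈ xs) → f a b = g a b) →
    xs.foldl (fun acc x => PySem.List.insertBy f x acc) acc
      = xs.foldl (fun acc x => PySem.List.insertBy g x acc) acc := by
  induction xs with
  | nil => intro acc _; rfl
  | cons x xs ih =>
    intro acc h
    simp only [List.foldl_cons]
    rw [insertBy_congr f g x acc
      (fun y hy => h x List.mem_cons_self y (Or.inl hy))]
    apply ih
    intro a ha b hb
    refine h a (List.mem_cons_of_mem _ ha) b ?_
    rcases hb with hb | hb
    · rcases (PySem.List.mem_insertBy _ _ _ _).1 hb with hb | hb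
      · exact Or.inr (hb ▸ List.mem_cons_self)
      · exact Or.inl hb
    · exact Or.inr (List.mem_cons_of_mem _ hb)

-- Python's tuple sort coincides with the first-component sort when the first component
-- determines the pair
theorem sorted2_eq_sorted (xs : List (Int × Int))
    (h : ∀ a ∈ xs, ∀ b ∈ xs, a.1 = b.1 → a = b) :
    PySem.List.sorted2 xs (fun p => p.1) (fun p => p.2) true
      = PySem.List.sorted xs (fun p => p.1) true := by
  unfold PySem.List.sorted2 PySem.List.sorted
  apply foldl_insertBy_congr
  intro a ha b hb
  rcases hb with hb | hb
  · cases hb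
  · by_cases h1 : b.1 < a.1
    · simp [h1]
    · by_cases h2 : a.1 < b.1
      · simp [h1, h2]
      · have : a = b := h a ha b hb (le_antisymm (not_lt.1 h1) (not_lt.1 h2))
        subst this
        simp

-- the descending list of distinct values of `vals`
def pvKeysDesc (vals : List Int) : List Int :=
  PySem.List.sorted (PySem.Set.ofList vals) (fun x => x) true

theorem pvKeysDesc_perm (vals : List Int) :
    (pvKeysDesc vals).Perm (PySem.Set.ofList vals) :=
  PySem.List.sorted_perm _ _ _

theorem pvKeysDesc_nodup (vals : List Int) : (pvKeysDesc vals).Nodup :=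
  ((pvKeysDesc_perm vals).nodup_iff).2 (PySem.Set.nodup_ofList vals)

theorem pvKeysDesc_gt (vals : List Int) :
    (pvKeysDesc vals).Pairwise (fun a b => b < a) := by
  have hge := PySem.List.sorted_pairwise_rev (PySem.Set.ofList vals) (fun x : Int => x)
  have hne := pvKeysDesc_nodup vals
  exact (hge.and hne).imp (fun h => lt_of_le_of_ne h.1 (Ne.symm h.2))

theorem mem_pvKeysDesc (vals : List Int) (x : Int) :
    x ∈ pvKeysDesc vals ↔ x ∈ vals := by
  rw [pvKeysDesc, PySem.List.mem_sorted, PySem.Set.mem_ofList]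

-- A's sorted Counter items, named: distinct values descending, with their multiplicities
theorem sorted_counter_items (vals : List Int) :
    PySem.List.sorted2 (PySem.Dict.counter vals).items (fun p => p.1) (fun p => p.2) true
      = (pvKeysDesc vals).map (fun k => (k, (vals.count k : Int))) := by
  rw [sorted2_eq_sorted]
  · apply PySem.List.sorted_rev_eq_of_perm_of_pairwise_gt
    · rw [PySem.Dict.items_counter]
      exact (pvKeysDesc_perm vals).map _
    · exact List.Pairwise.map _ (fun a b h => h) (pvKeysDesc_gt vals)
  · intro a ha b hb h1
    rw [PySem.Dict.items_counter] at ha hb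
    rcases List.mem_map.1 ha with ⟨k, _, rfl⟩
    rcases List.mem_map.1 hb with ⟨k', _, rfl⟩
    simp only at h1
    rw [h1]

theorem count_flat_sum (vals : List Int) (x : Int) :
    ∀ (D : List Int), D.Nodup →
    ((D.map (fun k => List.count x (List.replicate (vals.count k) k))).sum)
      = if x ∈ D then vals.count x else 0 := by
  intro D
  induction D with
  | nil => simp
  | cons k D ih =>
    intro hnd
    rw [List.map_cons, List.sum_cons, ih hnd.of_cons, List.count_replicate]
    by_cases hk : k = x
    · subst hk
      have hD : k ∉ D := (List.nodup_cons.1 hnd).1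
      simp [hD]
    · simp [List.mem_cons, hk, Ne.symm hk]

theorem flat_perm (vals : List Int) :
    ((pvKeysDesc vals).flatMap (fun k => List.replicate (vals.count k) k)).Perm vals := by
  rw [List.perm_iff_count]
  intro x
  rw [List.count_flatMap]
  have : (List.map (List.count x ∘ fun k => List.replicate (vals.count k) k) (pvKeysDesc vals)).sum
      = if x ∈ pvKeysDesc vals then vals.count x else 0 :=
    count_flat_sum vals x _ (pvKeysDesc_nodup vals)
  rw [this]
  by_cases hx : x ∈ vals
  · rw [if_pos ((mem_pvKeysDesc vals x).2 hx)]
  · rw [if_neg (fun h => hx ((mem_pvKeysDesc vals x).1 h)),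
      List.count_eq_zero_of_not_mem hx]

theorem flat_pairwise_aux (c : Int → Nat) :
    ∀ (D : List Int), D.Pairwise (fun a b => b < a) →
    (D.flatMap (fun k => List.replicate (c k) k)).Pairwise (fun a b => b ≤ a) := by
  intro D
  induction D with
  | nil => simp
  | cons k D ih =>
    intro h
    rw [List.flatMap_cons, List.pairwise_append]
    refine ⟨List.pairwise_replicate.2 (Or.inr le_rfl), ih h.of_cons, ?_⟩
    intro a ha b hb
    rcases List.eq_of_mem_replicate ha with rfl
    rcases List.mem_flatMap.1 hb with ⟨k', hk', hb'⟩
    rcases List.eq_of_mem_replicate hb' with rfl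
    exact le_of_lt (List.rel_of_pairwise_cons h hk')

theorem flat_pairwise (vals : List Int) :
    ((pvKeysDesc vals).flatMap (fun k => List.replicate (vals.count k) k)).Pairwise
      (fun a b => b ≤ a) :=
  flat_pairwise_aux _ _ (pvKeysDesc_gt vals)

-- A's sorted value list (descending), named: the key list expanded by multiplicities
theorem sorted_vals_eq_flat (vals : List Int) :
    PySem.List.sorted vals (fun x => x) true
      = (pvKeysDesc vals).flatMap (fun k => List.replicate (vals.count k) k) := by
  have h1 : (PySem.List.sorted vals (fun x => x) true).reverse.Perm
      ((pvKeysDesc vals).flatMap (fun k => List.replicate (vals.count k) k)).reverse :=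
    ((List.reverse_perm _).trans
      ((PySem.List.sorted_perm vals _ true).trans (flat_perm vals).symm)).trans
      (List.reverse_perm _).symm
  have := PySem.List.eq_of_perm_of_pairwise_le_of_injective (l₁ := (PySem.List.sorted vals (fun x => x) true).reverse)
    (l₂ := ((pvKeysDesc vals).flatMap (fun k => List.replicate (vals.count k) k)).reverse)
    (fun x : Int => x) (fun _ _ h => h) h1
    (List.pairwise_reverse.2 (PySem.List.sorted_pairwise_rev vals _))
    (List.pairwise_reverse.2 (flat_pairwise vals))
  exact List.reverse_injective this

-- B's ascending sort is the reverse of A's descending one (ties are equal values)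
theorem sortedAsc_eq_rev (vals : List Int) :
    PySem.List.sorted vals (fun x => x) false
      = (PySem.List.sorted vals (fun x => x) true).reverse := by
  apply PySem.List.eq_of_perm_of_pairwise_le_of_injective (fun x : Int => x) (fun _ _ h => h)
  · exact (PySem.List.sorted_perm vals _ false).trans
      (((List.reverse_perm _).trans (PySem.List.sorted_perm vals _ true)).symm)
  · exact PySem.List.sorted_pairwise vals _
  · exact List.pairwise_reverse.2 (PySem.List.sorted_pairwise_rev vals _)

-- ----- the scheduling arithmetic -----

-- the common grouped recurrence both per-node passes compute:
-- state (best, total), step (k, c) ↦ (max best (k + total + c - 1), total + c)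
def pvGStep (p : Int × Int) (kc : Int × Int) : Int × Int :=
  (max p.1 (kc.1 + p.2 + kc.2 - 1), p.2 + kc.2)

-- A's vacant/add pass: invariant  vacant = (mx + add) - (k2 + V - 1)
theorem afold_eq_gfold (mx : Int) :
    ∀ (G : List (Int × Int)) (k2 vac add V : Int),
    vac = (mx + add) - (k2 + V - 1) →
    mx + (G.foldl (fun (st : Int × Int × Int) (kv : Int × Int) =>
        if st.2.1 + (st.1 - kv.1 - 1) - (kv.2 - 1) < 0 then
          (kv.1, 0, st.2.2 + |st.2.1 + (st.1 - kv.1 - 1) - (kv.2 - 1)|)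
        else (kv.1, st.2.1 + (st.1 - kv.1 - 1) - (kv.2 - 1), st.2.2))
      (k2, vac, add)).2.2
      = (G.foldl pvGStep (mx + add, V)).1 := by
  intro G
  induction G with
  | nil => intro k2 vac add V _; rfl
  | cons kc G ih =>
    intro k2 vac add V hinv
    simp only [List.foldl_cons]
    by_cases hneg : vac + (k2 - kc.1 - 1) - (kc.2 - 1) < 0
    · rw [if_pos hneg, abs_of_neg hneg]
      have h1 : mx + (add + -(vac + (k2 - kc.1 - 1) - (kc.2 - 1))) = kc.1 + V + kc.2 - 1 := by
        omega
      rw [ih kc.1 0 _ (V + kc.2) (by omega)]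
      show _ = (G.foldl pvGStep (pvGStep (mx + add, V) kc)).1
      rw [h1]
      unfold pvGStep
      rw [max_eq_right (by omega)]
    · rw [if_neg hneg]
      rw [ih kc.1 _ add (V + kc.2) (by omega)]
      show _ = (G.foldl pvGStep (pvGStep (mx + add, V) kc)).1
      unfold pvGStep
      rw [max_eq_left (by omega)]

-- the old B-style running-max pass (proof vehicle only) over an enumerated constant run
theorem bfold_replicate (k : Int) :
    ∀ (c : Nat) (j b : Int),
    (PySem.List.enumerate (List.replicate c k) j).foldl
        (fun best ix => if ix.2 + ix.1 > best then ix.2 + ix.1 else best) b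
      = if c = 0 then b else max b (k + j + c - 1) := by
  intro c
  induction c with
  | zero => intro j b; rfl
  | succ c ih =>
    intro j b
    rw [List.replicate_succ]
    show (PySem.List.enumerate (k :: List.replicate c k) j).foldl _ b = _
    simp only [PySem.List.enumerate, List.foldl_cons]
    rw [ih (j + 1) _]
    by_cases hc : c = 0
    · subst hc
      simp only [reduceIte]
      split <;> (push_cast; omega)
    · rw [if_neg hc, if_neg (Nat.succ_ne_zero c)]
      split <;> (rcases le_total b (k + j) with h | h <;> push_cast <;> omega)

theorem bfold_flat (G : List (Int × Int)) (hpos : ∀ p ∈ G, 1 ≤ p.2) :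
    ∀ (j b : Int),
    (PySem.List.enumerate (G.flatMap (fun p => List.replicate p.2.toNat p.1)) j).foldl
        (fun best ix => if ix.2 + ix.1 > best then ix.2 + ix.1 else best) b
      = (G.foldl pvGStep (b, j)).1 := by
  induction G with
  | nil => intro j b; rfl
  | cons kc G ih =>
    intro j b
    have h1 : 1 ≤ kc.2 := hpos kc List.mem_cons_self
    have hc : kc.2.toNat ≠ 0 := by omega
    have h3 : (kc.2.toNat : Int) = kc.2 := by omega
    rw [List.flatMap_cons, PySem.List.enumerate_append, List.foldl_append,
      bfold_replicate, if_neg hc, ih (fun p hp => hpos p (List.mem_cons_of_mem _ hp)),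
      List.length_replicate, h3]
    show _ = (G.foldl pvGStep (pvGStep (b, j) kc)).1
    unfold pvGStep
    rfl

-- ----- per-node equality: A's pass on Counter(vals) = the enumerate-max over desc vals -----

theorem node_eq (vals : List Int) :
    (match PySem.List.sorted2 (PySem.Dict.counter vals).items (fun p => p.1) (fun p => p.2) true with
     | [] => (some 0 : Option Int)
     | c0 :: rest =>
       let st := rest.foldl (fun (st : Int × Int × Int) (kv : Int × Int) =>
           let vacant := st.2.1 + (st.1 - kv.1 - 1) - (kv.2 - 1)
           if vacant < 0 then (kv.1, 0, st.2.2 + |vacant|) else (kv.1, vacant, st.2.2))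
         (c0.1, 0, c0.2 - 1)
       some (c0.1 + st.2.2))
    = (match PySem.List.sorted vals (fun x => x) true with
     | [] => (some 0 : Option Int)
     | x0 :: t =>
       some ((PySem.List.enumerate (x0 :: t) 0).foldl
         (fun best (ix : Int × Int) => if ix.2 + ix.1 > best then ix.2 + ix.1 else best) x0)) := by
  by_cases hv : vals = []
  · subst hv; rfl
  · rw [sorted_counter_items vals, sorted_vals_eq_flat vals]
    rcases h : pvKeysDesc vals with _ | ⟨k0, D'⟩
    · exact absurd (((PySem.List.sorted_eq_nil_iff _ _ _).1 h)) (by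
        rcases List.exists_mem_of_ne_nil vals hv with ⟨x, hx⟩
        intro hh
        exact absurd ((PySem.Set.mem_ofList vals x).2 hx) (by rw [hh]; simp))
    have hk0 : k0 ∈ vals := (mem_pvKeysDesc vals k0).1 (h ▸ List.mem_cons_self)
    have hcpos : 0 < vals.count k0 := List.count_pos_iff.2 hk0
    obtain ⟨m, hm⟩ : ∃ m, vals.count k0 = m + 1 := ⟨vals.count k0 - 1, by omega⟩
    rw [List.map_cons, List.flatMap_cons, hm, List.replicate_succ]
    simp only [List.cons_append]
    rw [afold_eq_gfold k0 (D'.map _) k0 0 (((m + 1 : Nat) : Int) - 1) ((m + 1 : Nat) : Int)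
      (by ring)]
    rw [show (k0 :: (List.replicate m k0 ++ D'.flatMap (fun k => List.replicate (vals.count k) k)))
        = ((k0 :: D').map (fun k => (k, (vals.count k : Int)))).flatMap
            (fun p => List.replicate p.2.toNat p.1) from by
      rw [List.flatMap_map]
      simp only [Int.toNat_natCast]
      rw [List.flatMap_cons, hm, List.replicate_succ, List.cons_append]]
    rw [bfold_flat _ (by
      intro p hp
      rcases List.mem_map.1 hp with ⟨k, hk, rfl⟩
      have : k ∈ vals := (mem_pvKeysDesc vals k).1 (h ▸ hk)
      have := List.count_pos_iff.2 this
      simp only []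
      omega) 0 k0]
    rw [List.map_cons, List.foldl_cons]
    unfold pvGStep
    congr 2
    rw [hm]
    push_cast
    congr 1
    · congr 1 <;> omega

-- ----- the enumerate-max over the descending list = B's ascending fold -----

-- the if-step is a max-step
theorem ifstep_eq_maxstep :
    (fun (best : Int) (ix : Int × Int) => if ix.2 + ix.1 > best then ix.2 + ix.1 else best)
      = (fun (best : Int) (ix : Int × Int) => max best (ix.2 + ix.1)) := by
  funext b ix
  rw [max_def]
  split_ifs <;> omega

-- a `max a c` start of a max-fold factors out
theorem maxfold_init (l : List (Int × Int)) :
    ∀ (a c : Int),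
    l.foldl (fun (m : Int) (ix : Int × Int) => max m (ix.2 + ix.1)) (max a c)
      = max (l.foldl (fun (m : Int) (ix : Int × Int) => max m (ix.2 + ix.1)) a) c := by
  induction l with
  | nil => intro a c; rfl
  | cons x l ih =>
    intro a c
    simp only [List.foldl_cons]
    rw [max_right_comm, ih]

-- closed form of B's ascending fold as a max-fold over the reversed (descending) list
theorem F_closed :
    ∀ (t : List Int) (b : Int),
    t.foldl (fun best x => max (best + 1) x) b
      = (PySem.List.enumerate t.reverse 0).foldl
          (fun (m : Int) (ix : Int × Int) => max m (ix.2 + ix.1)) (b + t.length) := by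
  intro t
  induction t with
  | nil => intro b; simp
  | cons x t ih =>
    intro b
    simp only [List.foldl_cons, List.reverse_cons, PySem.List.enumerate_append,
      List.foldl_append, List.length_reverse, List.length_cons,
      PySem.List.enumerate_cons, PySem.List.enumerate_nil, List.foldl_nil, zero_add]
    rw [ih (max (b + 1) x)]
    have h2 : max (b + 1) x + (t.length : Int)
        = max (b + ((t.length : Int) + 1)) (x + (t.length : Int)) := by
      rcases le_total (b + 1) x with h | h
      · rw [max_eq_right h, max_eq_right (by omega)]
      · rw [max_eq_left h, max_eq_left (by omega)]
        ring
    rw [h2, maxfold_init]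
    push_cast
    ring_nf

-- the two per-node forms agree on any nonempty descending presentation r ++ [x0]
theorem E_eq_F (r : List Int) (x0 : Int) (h0 : Int) (hh : h0 = (r ++ [x0]).headI) :
    (PySem.List.enumerate (r ++ [x0]) 0).foldl
        (fun best (ix : Int × Int) => if ix.2 + ix.1 > best then ix.2 + ix.1 else best) h0
      = r.reverse.foldl (fun best x => max (best + 1) x) x0 := by
  rw [ifstep_eq_maxstep, F_closed, List.reverse_reverse, List.length_reverse,
    PySem.List.enumerate_append]
  simp only [List.foldl_append, PySem.List.enumerate_cons, PySem.List.enumerate_nil,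
    List.foldl_cons, List.foldl_nil, zero_add]
  cases r with
  | nil =>
    simp only [List.nil_append, List.headI] at hh
    rw [hh]
    simp only [PySem.List.enumerate_nil, List.foldl_nil, List.length_nil]
    omega
  | cons y0 rs =>
    simp only [List.cons_append, List.headI] at hh
    rw [hh]
    simp only [PySem.List.enumerate_cons, List.foldl_cons, zero_add, add_zero,
      max_self, List.length_cons]
    rw [show max (x0 + ((rs.length + 1 : Nat) : Int)) y0
          = max y0 (x0 + ((rs.length + 1 : Nat) : Int)) from max_comm _ _]
    rw [maxfold_init]

-- A-node = B-node on the same raw child list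
theorem node_eq2 (vals : List Int) :
    (match PySem.List.sorted2 (PySem.Dict.counter vals).items (fun p => p.1) (fun p => p.2) true with
     | [] => (some 0 : Option Int)
     | c0 :: rest =>
       let st := rest.foldl (fun (st : Int × Int × Int) (kv : Int × Int) =>
           let vacant := st.2.1 + (st.1 - kv.1 - 1) - (kv.2 - 1)
           if vacant < 0 then (kv.1, 0, st.2.2 + |vacant|) else (kv.1, vacant, st.2.2))
         (c0.1, 0, c0.2 - 1)
       some (c0.1 + st.2.2))
    = some (match PySem.List.sorted vals (fun x => x) false with
     | [] => (0 : Int)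
     | x0 :: t => t.foldl (fun best x => max (best + 1) x) x0) := by
  rw [node_eq, sortedAsc_eq_rev]
  cases ha : PySem.List.sorted vals (fun x => x) true with
  | nil => rfl
  | cons y0 t' =>
    rw [List.reverse_cons]
    cases hd : t'.reverse ++ [y0] with
    | nil => exact absurd hd (by simp)
    | cons x0 tt =>
      have heq : y0 :: t' = tt.reverse ++ [x0] := by
        have h := congrArg List.reverse hd
        simpa using h
      have hh : y0 = (tt.reverse ++ [x0]).headI := by
        rw [← heq]
        rfl
      have hE := E_eq_F tt.reverse x0 y0 hh
      rw [List.reverse_reverse] at hE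
      show some ((PySem.List.enumerate (y0 :: t') 0).foldl
          (fun best (ix : Int × Int) => if ix.2 + ix.1 > best then ix.2 + ix.1 else best) y0)
        = some (tt.foldl (fun best x => max (best + 1) x) x0)
      rw [heq, hE]

-- A's child fold propagates none
theorem afold_none (nodes : List (Int × List Int)) (fuel : Nat) (u prev : Int) :
    ∀ (adj : List Int),
    adj.foldl (fun (oC : Option (PySem.Dict Int Int)) (v : Int) =>
        match oC with
        | none => none
        | some C =>
          if v ≠ prev then
            match dfsRecA nodes fuel v u with
            | none => none
            | some r => some (C.modify (r + 1) 0 (· + 1))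
          else some C) none = none := by
  intro adj
  induction adj with
  | nil => rfl
  | cons x a ihx => simpa using ihx

-- A's Counter accumulation = Counter of B's comprehension list
theorem childfold (nodes : List (Int × List Int)) (fuel : Nat) (u prev : Int)
    (ih : ∀ v p, dfsRecA nodes fuel v p = dfsRecB nodes fuel v p) :
    ∀ (adj : List Int) (L : List Int),
    adj.foldl (fun (oC : Option (PySem.Dict Int Int)) (v : Int) =>
        match oC with
        | none => none
        | some C =>
          if v ≠ prev then
            match dfsRecA nodes fuel v u with
            | none => none
            | some r => some (C.modify (r + 1) 0 (· + 1))
          else some C) (some (PySem.Dict.counter L))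
      = ((adj.filter (fun v => v != prev)).mapM
          (fun v => (dfsRecB nodes fuel v u).map (· + 1))).map
          (fun vals => PySem.Dict.counter (L ++ vals)) := by
  intro adj
  induction adj with
  | nil => intro L; simp
  | cons v adj iha =>
    intro L
    simp only [List.foldl_cons, List.filter_cons]
    by_cases hvp : v ≠ prev
    · have hb : (v != prev) = true := by simpa using hvp
      rw [if_pos hb, ih v u]
      simp only [List.mapM_cons, hvp, if_true, ne_eq, not_false_iff]
      cases hB : dfsRecB nodes fuel v u with
      | none =>
        rw [afold_none]
        simp
      | some r =>
        simp only [Option.map_some]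
        rw [← PySem.Dict.counter_append_singleton]
        rw [iha (L ++ [r + 1])]
        cases (adj.filter (fun v => v != prev)).mapM
            (fun v => (dfsRecB nodes fuel v u).map (· + 1)) with
        | none => rfl
        | some rest => simp [List.append_assoc]
    · have hb : ¬ ((v != prev) = true) := by simpa using hvp
      rw [if_neg hb, if_neg hvp]
      exact iha L

theorem dfsRec_eq (nodes : List (Int × List Int)) (fuel : Nat) (u prev : Int) :
    dfsRecA nodes fuel u prev = dfsRecB nodes fuel u prev := by
  induction fuel generalizing u prev with
  | zero => rfl
  | succ fuel ih =>
    rw [dfsRecA, dfsRecB]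
    cases hget : (PySem.Dict.ofList nodes).get? u with
    | none => rfl
    | some adj =>
      simp only [Option.bind_some]
      have hcf := childfold nodes fuel u prev (fun v p => ih v p) adj []
      rw [show PySem.Dict.empty = PySem.Dict.counter ([] : List Int) from rfl, hcf]
      cases hB : (adj.filter (fun v => v != prev)).mapM
          (fun v => (dfsRecB nodes fuel v u).map (· + 1)) with
      | none => rfl
      | some vals =>
        simp only [Option.map_some, List.nil_append]
        exact node_eq2 vals

-- ===== VERDICT (by name: the statement is the Claim_ definition above) =====
theorem dfs_spec : Claim_equal_dfs := by
  intro N nodes src _ _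
  unfold Spec_dfs dfs dfs_alt
  rw [dfsRec_eq]
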